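-- pv_equiv track=rewrite | github.com/mouredev/roadmap-retos-programacion | Roadmap/02 - FUNCIONES Y ALCANCE/python/jorgeadamowicz.py | my_extra_function
-- ===== SOURCE A (Python) =====
-- def my_extra_function (parameter_1, parameter_2):
--     counter = 0
--     multiplo_de_tres = 0
--     multiplo_de_cinco = 0
--
--     for number in range (1,101):
--         if number % 3 == 0 and number % 5 == 0:
--             counter += 1
--
--
--         elif number % 3 == 0:
--             multiplo_de_tres += 1
--
--
--         elif number % 5 == 0:
--             multiplo_de_cinco += 1
--
--     return (f" {parameter_1}, y {parameter_2}, {counter}", f"{parameter_1}, {multiplo_de_tres}", f"{parameter_2}, {multiplo_de_cinco}")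
-- ===== SOURCE B (Python) =====
-- def my_extra_function(parameter_1, parameter_2):
--     # Closed-form counts over 1..100: no loop needed.
--     counter = 100 // 15
--     multiplo_de_tres = 100 // 3 - 100 // 15
--     multiplo_de_cinco = 100 // 5 - 100 // 15
--     return (f" {parameter_1}, y {parameter_2}, {counter}",
--             f"{parameter_1}, {multiplo_de_tres}",
--             f"{parameter_2}, {multiplo_de_cinco}")
-- ===== Notes on version B (the rewrite author's own statement) =====
-- stated objective: simpler
-- what changed: Replaces the 1..100 loop with if/elif branch ladder by direct closed-form divisor counts (100//15, 100//3-100//15, 100//5-100//15), keeping the exact f-string formatting.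
import Mathlib
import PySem

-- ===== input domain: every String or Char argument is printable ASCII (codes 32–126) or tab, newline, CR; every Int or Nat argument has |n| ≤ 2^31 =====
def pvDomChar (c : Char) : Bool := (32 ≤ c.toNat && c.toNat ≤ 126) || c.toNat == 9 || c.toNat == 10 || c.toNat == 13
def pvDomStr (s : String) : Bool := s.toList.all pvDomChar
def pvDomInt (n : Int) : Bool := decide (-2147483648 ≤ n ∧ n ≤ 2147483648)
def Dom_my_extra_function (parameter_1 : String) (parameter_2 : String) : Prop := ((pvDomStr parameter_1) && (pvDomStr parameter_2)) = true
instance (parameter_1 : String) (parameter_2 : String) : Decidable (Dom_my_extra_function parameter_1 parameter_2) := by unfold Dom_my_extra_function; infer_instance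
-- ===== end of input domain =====

-- B replaces A's 1..100 loop and if/elif ladder with closed-form divisor counts; objective: simpler.

-- ===== PORT A =====
-- the loop over range(1,101) accumulating (counter, multiplo_de_tres, multiplo_de_cinco)
def pvLoopA : Int × Int × Int :=
  (PySem.List.pyRange 1 101 1).foldl
    (fun (st : Int × Int × Int) number =>
      let (counter, tres, cinco) := st
      if PySem.Int.mod number 3 = 0 ∧ PySem.Int.mod number 5 = 0 then (counter + 1, tres, cinco)
      else if PySem.Int.mod number 3 = 0 then (counter, tres + 1, cinco)
      else if PySem.Int.mod number 5 = 0 then (counter, tres, cinco + 1)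
      else (counter, tres, cinco))
    (0, 0, 0)

def my_extra_function (parameter_1 : String) (parameter_2 : String) : String × String × String :=
  let (counter, tres, cinco) := pvLoopA
  (" " ++ parameter_1 ++ ", y " ++ parameter_2 ++ ", " ++ PySem.Int.toStr counter,
   parameter_1 ++ ", " ++ PySem.Int.toStr tres,
   parameter_2 ++ ", " ++ PySem.Int.toStr cinco)

-- ===== PORT B =====
def my_extra_function_alt (parameter_1 : String) (parameter_2 : String) : String × String × String :=
  let counter : Int := PySem.Int.floordiv 100 15
  let tres : Int := PySem.Int.floordiv 100 3 - PySem.Int.floordiv 100 15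
  let cinco : Int := PySem.Int.floordiv 100 5 - PySem.Int.floordiv 100 15
  (" " ++ parameter_1 ++ ", y " ++ parameter_2 ++ ", " ++ PySem.Int.toStr counter,
   parameter_1 ++ ", " ++ PySem.Int.toStr tres,
   parameter_2 ++ ", " ++ PySem.Int.toStr cinco)

-- ===== PRECONDITION & SPEC =====
def Spec_my_extra_function (parameter_1 : String) (parameter_2 : String) (out : String × String × String) : Prop := out = my_extra_function_alt parameter_1 parameter_2
instance (parameter_1 : String) (parameter_2 : String) (out : String × String × String) : Decidable (Spec_my_extra_function parameter_1 parameter_2 out) := by unfold Spec_my_extra_function; infer_instance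

-- ===== CLAIM (what is proved, stated in full; the proofs are below) =====
def Claim_equal_my_extra_function : Prop := ∀ (parameter_1 : String) (parameter_2 : String), Dom_my_extra_function parameter_1 parameter_2 → Spec_my_extra_function parameter_1 parameter_2 (my_extra_function parameter_1 parameter_2)

-- ===== LEMMAS AND PROOFS =====
theorem pvLoopA_eq : pvLoopA = (6, 27, 14) := by decide

-- ===== VERDICT =====
theorem my_extra_function_spec : Claim_equal_my_extra_function := by
  intro p1 p2 _
  show my_extra_function p1 p2 = my_extra_function_alt p1 p2
  simp only [my_extra_function, my_extra_function_alt, pvLoopA_eq]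
  rfl
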